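-- pv_equiv track=rewrite | github.com/Aasthaengg/IBMdataset | Python_codes/p03646/s225827599.py | solve
-- ===== SOURCE A (Python) =====
-- def solve(k, n):
--     q, r = divmod(k, n)
--     a = list(range(q, n + q))
--
--     max_ = n + q - 1
--     for i in range(r):
--         a[i] += n
--         for j in range(n):
--             if i == j:
--                 continue
--             a[j] -= 1
--             if a[j] < 0:
--                 return []
--
--         if a[i] < max_:
--             return []
--         else:
--             max_ = a[i]
--     return a
-- ===== SOURCE B (Python) =====
-- def solve(k, n):
--     q, r = divmod(k, n)
--     if r == 0:
--         return list(range(q, n + q))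
--     if q < 0:
--         return []
--     return [q + n - r + 1 + j for j in range(r)] + list(range(q, q + n - r))
-- ===== Notes on version B (the rewrite author's own statement) =====
-- stated objective: faster
-- what changed: Replaced the r passes of pairwise decrements and validity checks by closed-form final values and a closed-form success condition (q >= 0), computed in one O(n) construction.
import Mathlib
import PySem

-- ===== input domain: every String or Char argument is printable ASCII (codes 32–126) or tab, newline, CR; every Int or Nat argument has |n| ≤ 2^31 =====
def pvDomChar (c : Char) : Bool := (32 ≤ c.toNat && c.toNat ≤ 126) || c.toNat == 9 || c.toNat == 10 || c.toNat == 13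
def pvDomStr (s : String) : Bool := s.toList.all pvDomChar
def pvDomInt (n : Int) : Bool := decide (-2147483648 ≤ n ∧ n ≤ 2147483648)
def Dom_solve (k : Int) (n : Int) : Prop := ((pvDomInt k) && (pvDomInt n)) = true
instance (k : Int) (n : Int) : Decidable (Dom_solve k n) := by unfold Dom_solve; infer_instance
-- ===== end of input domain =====

-- B replaces A's r passes of decrements and validity checks by closed-form final
-- values and a closed-form success condition, built in one O(n) pass.

-- ===== PORT A =====
-- inner 'for j in range(n)' loop over the index list; 'return []' is signalled by none
def solveInner (i : Int) : List Int → List Int → Option (List Int)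
  | [], a => some a
  | j :: js, a =>
    if i = j then solveInner i js a
    else
      let a' := PySem.List.pySetD a j (PySem.List.pyGetD a j 0 - 1)
      if PySem.List.pyGetD a' j 0 < 0 then none
      else solveInner i js a'

-- outer 'for i in range(r)' loop, carrying (a, max_)
def solveOuter (n : Int) : List Int → List Int → Int → List Int
  | [], a, _ => a
  | i :: is, a, m =>
    let a1 := PySem.List.pySetD a i (PySem.List.pyGetD a i 0 + n)
    match solveInner i (PySem.List.pyRange 0 n 1) a1 with
    | none => []
    | some a2 =>
      if PySem.List.pyGetD a2 i 0 < m then []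
      else solveOuter n is a2 (PySem.List.pyGetD a2 i 0)

def solve (k : Int) (n : Int) : List Int :=
  match PySem.Int.divmod? k n with
  | none => []   -- ZeroDivisionError (n = 0), excluded by Pre_solve
  | some (q, r) =>
    solveOuter n (PySem.List.pyRange 0 r 1) (PySem.List.pyRange q (n + q) 1) (n + q - 1)

-- ===== PORT B =====
def solve_alt (k : Int) (n : Int) : List Int :=
  match PySem.Int.divmod? k n with
  | none => []   -- ZeroDivisionError (n = 0), excluded by Pre_solve
  | some (q, r) =>
    if r = 0 then PySem.List.pyRange q (n + q) 1
    else if q < 0 then []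
    else (PySem.List.pyRange 0 r 1).map (fun j => q + n - r + 1 + j)
         ++ PySem.List.pyRange q (q + n - r) 1

-- ===== PRECONDITION & SPEC =====
-- Python A raises ZeroDivisionError at divmod(k, n) when n = 0; everywhere else it returns.
def Pre_solve (k : Int) (n : Int) : Prop := n ≠ 0
instance (k : Int) (n : Int) : Decidable (Pre_solve k n) := by unfold Pre_solve; infer_instance
def pvWitness_solve : Int × Int := (7, 3)

def Spec_solve (k : Int) (n : Int) (out : List Int) : Prop := out = solve_alt k n
instance (k : Int) (n : Int) (out : List Int) : Decidable (Spec_solve k n out) := by unfold Spec_solve; infer_instance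

-- ===== CLAIM (what is proved, stated in full; the proofs are below) =====
def Claim_equal_solve : Prop := ∀ (k : Int) (n : Int), Dom_solve k n → Pre_solve k n → Spec_solve k n (solve k n)

-- ===== LEMMAS AND PROOFS =====

-- state after i complete passes of the outer loop (q = k//n, length N = n)
def stA (q n i : Int) (N : Nat) : List Int :=
  (List.range N).map (fun (j : Nat) => if (j : Int) < i then q + j + n - i + 1 else q + j - i)

-- value at position j during pass i, after 'a[i] += n' but before any decrement
def passVal (q n i : Int) (j : Nat) : Int :=
  if (j : Int) = i then q + n
  else if (j : Int) < i then q + j + n - i + 1 else q + j - i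

-- array during pass i after positions below c have been processed
def innerArr (q n i c : Int) (N : Nat) : List Int :=
  (List.range N).map (fun (j : Nat) =>
    if (j : Int) < c ∧ (j : Int) ≠ i then passVal q n i j - 1 else passVal q n i j)

theorem length_innerArr (q n i c : Int) (N : Nat) : (innerArr q n i c N).length = N := by
  simp [innerArr]

theorem getElem_innerArr (q n i c : Int) (N : Nat) (j : Nat) (h : j < N) :
    (innerArr q n i c N)[j]'(by simpa [length_innerArr] using h) =
    (if (j : Int) < c ∧ (j : Int) ≠ i then passVal q n i j - 1 else passVal q n i j) := by
  simp [innerArr]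

theorem length_stA (q n i : Int) (N : Nat) : (stA q n i N).length = N := by
  simp [stA]

theorem getElem_stA (q n i : Int) (N : Nat) (j : Nat) (h : j < N) :
    (stA q n i N)[j]'(by simpa [length_stA] using h) =
    (if (j : Int) < i then q + j + n - i + 1 else q + j - i) := by
  simp [stA]

-- one full inner pass (q ≥ 0): from the state with only a[i] bumped, to all j ≠ i decremented
theorem inner_run (q n i : Int) (hq : 0 ≤ q) (hi : 0 ≤ i) (hin : i ≤ n - 2) :
    ∀ c : Int, 0 ≤ c → c ≤ n →
    solveInner i (PySem.List.pyRange c n 1) (innerArr q n i c n.toNat) =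
      some (innerArr q n i n n.toNat) := by
  intro c hc0 hcn
  induction hN : (n - c).toNat generalizing c with
  | zero =>
    have hce : c = n := by omega
    subst hce
    rw [PySem.List.pyRange_one_eq_nil le_rfl]
    rfl
  | succ N ih =>
    have hcn' : c < n := by omega
    rw [PySem.List.pyRange_one_cons hcn']
    by_cases hci : i = c
    · -- 'continue' branch: innerArr is the same at c and c+1
      have harr : innerArr q n i c n.toNat = innerArr q n i (c + 1) n.toNat := by
        unfold innerArr
        apply List.map_congr_left
        intro j hj
        split_ifs with h1 h2 h2 <;> first | rfl | omega
      rw [solveInner, if_pos hci, harr]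
      exact ih (c + 1) (by omega) (by omega) (by omega)
    · -- decrement branch
      have hclt : c.toNat < n.toNat := by omega
      have hget : PySem.List.pyGetD (innerArr q n i c n.toNat) c 0 = passVal q n i c.toNat := by
        rw [PySem.List.pyGetD_eq_getElem _ 0 hc0 (by rw [length_innerArr]; omega)]
        rw [getElem_innerArr q n i c n.toNat c.toNat hclt]
        rw [if_neg (by omega)]
      have hset : PySem.List.pySetD (innerArr q n i c n.toNat) c (passVal q n i c.toNat - 1)
          = innerArr q n i (c + 1) n.toNat := by
        rw [PySem.List.pySetD_of_nonneg _ _ hc0]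
        apply List.ext_getElem (by simp [length_innerArr])
        intro j h1 h2
        rw [List.getElem_set]
        rw [getElem_innerArr q n i (c+1) n.toNat j (by simpa [length_innerArr] using h2)]
        by_cases hjc : c.toNat = j
        · subst hjc
          rw [if_pos rfl, if_pos (by constructor <;> omega)]
        · rw [if_neg hjc]
          rw [getElem_innerArr q n i c n.toNat j
            (by simpa [List.length_set, length_innerArr] using h1)]
          split_ifs with h1' h2' h2' <;> first | rfl | omega
      have hval : 1 ≤ passVal q n i c.toNat := by
        unfold passVal
        split_ifs <;> omega
      rw [solveInner, if_neg (by omega), hget, hset]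
      have hget2 : PySem.List.pyGetD (innerArr q n i (c+1) n.toNat) c 0
          = passVal q n i c.toNat - 1 := by
        rw [PySem.List.pyGetD_eq_getElem _ 0 hc0 (by rw [length_innerArr]; omega)]
        rw [getElem_innerArr q n i (c+1) n.toNat c.toNat hclt]
        rw [if_pos (by constructor <;> omega)]
      show (if PySem.List.pyGetD (innerArr q n i (c+1) n.toNat) c 0 < 0 then none
        else solveInner i (PySem.List.pyRange (c+1) n 1) (innerArr q n i (c+1) n.toNat))
        = some (innerArr q n i n n.toNat)
      rw [hget2, if_neg (by omega)]
      exact ih (c + 1) (by omega) (by omega) (by omega)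

-- the completed pass i is the (i+1)-pass state
theorem innerArr_last (q n i : Int) (hi : 0 ≤ i) :
    innerArr q n i n n.toNat = stA q n (i + 1) n.toNat := by
  unfold innerArr stA passVal
  apply List.map_congr_left
  intro j hj
  rw [List.mem_range] at hj
  have hjn : (j : Int) < n := by omega
  split_ifs <;> omega

-- bumping a[i] in the i-pass state gives the pass-i working array
theorem bump_eq_innerArr0 (q n i : Int) (hi : 0 ≤ i) (hiN : i < n) :
    PySem.List.pySetD (stA q n i n.toNat) i (PySem.List.pyGetD (stA q n i n.toNat) i 0 + n)
      = innerArr q n i 0 n.toNat := by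
  have hlt : i.toNat < n.toNat := by omega
  have hget : PySem.List.pyGetD (stA q n i n.toNat) i 0 = q := by
    rw [PySem.List.pyGetD_eq_getElem _ 0 hi (by rw [length_stA]; omega)]
    rw [getElem_stA q n i n.toNat i.toNat hlt]
    rw [if_neg (by omega)]
    omega
  rw [hget, PySem.List.pySetD_of_nonneg _ _ hi]
  apply List.ext_getElem (by simp [List.length_set, length_stA, length_innerArr])
  intro j h1 h2
  have hjlt : j < n.toNat := by simpa [length_innerArr] using h2
  rw [List.getElem_set]
  rw [getElem_innerArr q n i 0 n.toNat j hjlt]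
  rw [if_neg (show ¬ ((j:Int) < 0 ∧ (j:Int) ≠ i) by omega)]
  unfold passVal
  by_cases hji : i.toNat = j
  · rw [if_pos hji, if_pos (show ((j:Int) = i) by omega)]
  · rw [if_neg hji]
    rw [getElem_stA q n i n.toNat j (by simpa [List.length_set, length_stA] using h1)]
    rw [if_neg (show ¬ ((j:Int) = i) by omega)]

-- the outer loop from pass i onward (q ≥ 0) runs to completion
theorem outer_run (q n r : Int) (hq : 0 ≤ q) (hr : r ≤ n - 1) :
    ∀ i m : Int, 0 ≤ i → i ≤ r → m ≤ q + n →
    solveOuter n (PySem.List.pyRange i r 1) (stA q n i n.toNat) m = stA q n r n.toNat := by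
  intro i m hi0 hir hm
  induction hN : (r - i).toNat generalizing i m with
  | zero =>
    have : i = r := by omega
    subst this
    rw [PySem.List.pyRange_one_eq_nil le_rfl]
    rfl
  | succ N ih =>
    have hir' : i < r := by omega
    rw [PySem.List.pyRange_one_cons hir', solveOuter]
    rw [bump_eq_innerArr0 q n i hi0 (by omega)]
    rw [inner_run q n i hq hi0 (by omega) 0 le_rfl (by omega)]
    rw [innerArr_last q n i hi0]
    show (if PySem.List.pyGetD (stA q n (i+1) n.toNat) i 0 < m then []
      else solveOuter n (PySem.List.pyRange (i+1) r 1) (stA q n (i+1) n.toNat)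
        (PySem.List.pyGetD (stA q n (i+1) n.toNat) i 0)) = stA q n r n.toNat
    have hget : PySem.List.pyGetD (stA q n (i + 1) n.toNat) i 0 = q + n := by
      rw [PySem.List.pyGetD_eq_getElem _ 0 hi0 (by rw [length_stA]; omega)]
      rw [getElem_stA q n (i+1) n.toNat i.toNat (by omega)]
      rw [if_pos (by omega)]
      omega
    rw [hget, if_neg (by omega)]
    exact ih (i + 1) (q + n) (by omega) (by omega) le_rfl (by omega)

-- the initial array of A is the 0-pass state
theorem stA_zero (q n : Int) : PySem.List.pyRange q (n + q) 1 = stA q n 0 n.toNat := by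
  rw [PySem.List.pyRange_one]
  unfold stA
  rw [show n + q - q = n by ring]
  apply List.map_congr_left
  intro j hj
  rw [if_neg (by omega)]
  omega

-- the final state equals B's closed form
theorem stA_final (q n r : Int) (h0 : 0 ≤ r) (hr : r ≤ n - 1) :
    stA q n r n.toNat =
      (PySem.List.pyRange 0 r 1).map (fun j => q + n - r + 1 + j)
      ++ PySem.List.pyRange q (q + n - r) 1 := by
  apply List.ext_getElem
  · simp [length_stA, PySem.List.length_pyRange_one]
    omega
  intro j h1 h2
  rw [getElem_stA q n r n.toNat j (by simpa [length_stA] using h1)]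
  by_cases hjr : j < r.toNat
  · rw [List.getElem_append_left (by simpa [PySem.List.length_pyRange_one] using hjr)]
    rw [List.getElem_map]
    rw [PySem.List.getElem_pyRange_one]
    rw [if_pos (by omega)]
    omega
  · rw [List.getElem_append_right (by simpa [PySem.List.length_pyRange_one] using hjr)]
    rw [PySem.List.getElem_pyRange_one]
    rw [if_neg (by omega)]
    simp [PySem.List.length_pyRange_one]
    omega

-- the first pass fails immediately at j = 1 when q < 0
theorem inner_fail (q n : Int) (hq : q < 0) (hn : 2 ≤ n) :
    solveInner 0 (PySem.List.pyRange 0 n 1) (innerArr q n 0 0 n.toNat) = none := by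
  have h1n : (1 : Nat) < n.toNat := by omega
  rw [PySem.List.pyRange_one_cons (by omega : (0:Int) < n)]
  rw [PySem.List.pyRange_one_cons (by omega : (0:Int) + 1 < n)]
  norm_num
  rw [solveInner, if_pos rfl, solveInner, if_neg (by omega)]
  have hget : PySem.List.pyGetD (innerArr q n 0 0 n.toNat) 1 0 = q + 1 := by
    rw [PySem.List.pyGetD_eq_getElem _ 0 (by omega) (by rw [length_innerArr]; omega)]
    simp only [Int.toNat_one]
    rw [getElem_innerArr q n 0 0 n.toNat 1 h1n]
    rw [if_neg (by omega)]
    unfold passVal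
    rw [if_neg (by omega), if_neg (by omega)]
    push_cast
    ring
  rw [hget]
  rw [PySem.List.pySetD_of_nonneg _ _ (by omega : (0:Int) ≤ 1)]
  have hget2 : PySem.List.pyGetD ((innerArr q n 0 0 n.toNat).set (1:Int).toNat (q + 1 - 1)) 1 0
      = q := by
    rw [PySem.List.pyGetD_eq_getElem _ 0 (by omega)
      (by rw [List.length_set, length_innerArr]; omega)]
    simp only [Int.toNat_one]
    rw [List.getElem_set, if_pos rfl]
    omega
  show (if PySem.List.pyGetD ((innerArr q n 0 0 n.toNat).set (1:Int).toNat (q + 1 - 1)) 1 0 < 0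
      then none
      else solveInner 0 (PySem.List.pyRange 2 n 1)
        ((innerArr q n 0 0 n.toNat).set (1:Int).toNat (q + 1 - 1))) = none
  rw [hget2, if_pos (by omega)]

-- ===== VERDICT (by name: the statement is the Claim_ definition above) =====
theorem solve_spec : Claim_equal_solve := by
  intro k n _ hn
  unfold Spec_solve solve solve_alt
  have hdm : PySem.Int.divmod? k n = some (PySem.Int.floordiv k n, PySem.Int.mod k n) := by
    simp [PySem.Int.divmod?, PySem.Int.floordiv, PySem.Int.mod]
    exact hn
  rw [hdm]
  set q := PySem.Int.floordiv k n with hqdef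
  set r := PySem.Int.mod k n with hrdef
  show solveOuter n (PySem.List.pyRange 0 r 1) (PySem.List.pyRange q (n + q) 1) (n + q - 1)
      = (if r = 0 then PySem.List.pyRange q (n + q) 1
         else if q < 0 then []
         else (PySem.List.pyRange 0 r 1).map (fun j => q + n - r + 1 + j)
              ++ PySem.List.pyRange q (q + n - r) 1)
  rcases lt_trichotomy n 0 with hneg | hzero | hpos
  · -- n < 0: n < r ≤ 0, A's outer loop is empty and its array is the empty range;
    -- B's branches are the empty range (r = 0) or two empty pieces (r < 0)
    have hb := PySem.Int.mod_neg_bounds k hneg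
    rw [PySem.List.pyRange_one_eq_nil hb.2, solveOuter]
    by_cases hre : r = 0
    · rw [if_pos hre]
    · rw [if_neg hre]
      rw [PySem.List.pyRange_one_eq_nil (by omega : n + q ≤ q)]
      by_cases hq : q < 0
      · rw [if_pos hq]
      · rw [if_neg hq]
        rw [PySem.List.pyRange_one_eq_nil (by omega : q + n - r ≤ q)]
        rfl
  · exact absurd hzero hn
  · have hr0 : 0 ≤ r := PySem.Int.mod_nonneg k hpos
    have hrn : r < n := PySem.Int.mod_lt k hpos
    by_cases hre : r = 0
    · rw [hre, PySem.List.pyRange_one_eq_nil le_rfl, solveOuter]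
      rw [if_pos rfl]
    · have hn2 : 2 ≤ n := by omega
      rw [if_neg hre]
      rw [stA_zero]
      by_cases hq : q < 0
      · -- q < 0: A's first pass hits a negative entry and returns []
        rw [if_pos hq]
        rw [PySem.List.pyRange_one_cons (by omega : (0:Int) < r), solveOuter]
        rw [bump_eq_innerArr0 q n 0 le_rfl (by omega)]
        rw [inner_fail q n hq hn2]
      · -- q ≥ 0: every pass succeeds; final state is B's closed form
        rw [if_neg hq]
        rw [outer_run q n r (by omega) (by omega) 0 (n + q - 1) le_rfl (by omega) (by omega)]
        exact stA_final q n r hr0 (by omega)
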